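-- pv_equiv track=rewrite | github.com/TachyonicProject/luxon | luxon/utils/text.py | unquote_string
-- ===== SOURCE A (Python) =====
-- def unquote_string(quoted):
--     """Unquote an "quoted-string".
--
--     Args:
--         quoted (str): Original quoted string
--
--     Returns:
--         Unquoted string
--     """
--
--     if len(quoted) < 2:
--         return quoted
--     elif quoted[0] != '"' or quoted[-1] != '"':
--         return quoted
--
--     tmp_quoted = quoted[1:-1]
--
--     if '\\' not in tmp_quoted:
--         return tmp_quoted
--     elif r'\\' not in tmp_quoted:
--         return tmp_quoted.replace('\\', '')
--     else:
--         return '\\'.join([q.replace('\\', '')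
--                           for q in tmp_quoted.split(r'\\')])
-- ===== SOURCE B (Python) =====
-- def unquote_string(quoted):
--     """Unquote a "quoted-string" by a single left-to-right scan.
--
--     Same guards as the original; the escape handling is one explicit pass:
--     a pair of backslashes yields one backslash, a lone backslash is dropped.
--     """
--     if len(quoted) < 2:
--         return quoted
--     if quoted[0] != '"' or quoted[-1] != '"':
--         return quoted
--
--     tmp = quoted[1:-1]
--     out = []
--     i = 0
--     n = len(tmp)
--     while i < n:
--         c = tmp[i]
--         if c == '\\':
--             if i + 1 < n and tmp[i + 1] == '\\':
--                 out.append('\\')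
--                 i += 2
--             else:
--                 i += 1
--         else:
--             out.append(c)
--             i += 1
--     return ''.join(out)
-- ===== Notes on version B (the rewrite author's own statement) =====
-- stated objective: simpler
-- what changed: A's three-way branch on substring containment with split/replace/join over the backslash escapes is replaced by a single explicit left-to-right scan that pairs backslashes (a pair emits one backslash, a lone backslash is dropped, other characters are copied).
import Mathlib
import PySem

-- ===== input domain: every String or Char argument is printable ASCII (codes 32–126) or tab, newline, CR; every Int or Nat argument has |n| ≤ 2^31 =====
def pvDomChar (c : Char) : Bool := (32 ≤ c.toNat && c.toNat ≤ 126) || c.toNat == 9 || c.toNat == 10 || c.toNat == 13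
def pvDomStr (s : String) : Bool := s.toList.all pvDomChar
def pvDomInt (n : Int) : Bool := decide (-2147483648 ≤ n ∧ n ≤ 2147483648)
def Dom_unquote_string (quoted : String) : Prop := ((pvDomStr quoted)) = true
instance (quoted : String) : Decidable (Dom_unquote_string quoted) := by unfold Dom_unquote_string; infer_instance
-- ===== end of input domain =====

-- B replaces A's split/replace/join pipeline by one explicit left-to-right scan (different decomposition, same values).

-- ===== PORT A =====
def unquote_string (quoted : String) : String :=
  if PySem.Str.len quoted < 2 then quoted
  else if PySem.Str.pyGet? quoted 0 != some '"' || PySem.Str.pyGet? quoted (-1) != some '"' then quoted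
  else
    let tmp := PySem.Str.slice quoted (some 1) (some (-1))
    if !PySem.Str.isIn "\\" tmp then tmp
    else if !PySem.Str.isIn "\\\\" tmp then PySem.Str.replace tmp "\\" ""
    else PySem.Str.join "\\"
      (((PySem.Str.split? tmp "\\\\").getD []).map (fun q => PySem.Str.replace q "\\" ""))
      -- `.getD []` only totalizes: the separator is nonempty, so split? is always `some`

-- ===== PORT B =====
-- the while-loop of Source B over index i, as structural recursion on the not-yet-read suffix tmp[i:]
def pvScan : List Char → List Char
  | [] => []
  | c :: rest =>
    if c = '\\' then
      match rest with
      | c2 :: r => if c2 = '\\' then '\\' :: pvScan r else pvScan (c2 :: r)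
      | [] => []
    else c :: pvScan rest

def unquote_string_alt (quoted : String) : String :=
  if PySem.Str.len quoted < 2 then quoted
  else if PySem.Str.pyGet? quoted 0 != some '"' || PySem.Str.pyGet? quoted (-1) != some '"' then quoted
  else String.ofList (pvScan (PySem.Str.slice quoted (some 1) (some (-1))).toList)

-- ===== PRECONDITION & SPEC =====
def Spec_unquote_string (quoted : String) (out : String) : Prop := out = unquote_string_alt quoted
instance (quoted : String) (out : String) : Decidable (Spec_unquote_string quoted out) := by unfold Spec_unquote_string; infer_instance

-- ===== CLAIM (what is proved, stated in full; the proofs are below) =====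
def Claim_equal_unquote_string : Prop := ∀ (quoted : String), Dom_unquote_string quoted → Spec_unquote_string quoted (unquote_string quoted)

-- ===== LEMMAS AND PROOFS =====

-- Python's tmp.split('\\\\') as a direct recursion, shaped like pvScan (proved equal to PySem.Chars.splitOn below)
def pvPieces : List Char → List (List Char)
  | [] => [[]]
  | c :: rest =>
    if c = '\\' then
      match rest with
      | c2 :: r => if c2 = '\\' then [] :: pvPieces r else (pvPieces (c2 :: r)).modifyHead (c :: ·)
      | [] => [['\\']]
    else (pvPieces rest).modifyHead (c :: ·)

theorem pvPieces_ne_nil (l : List Char) : pvPieces l ≠ [] := by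
  induction l using pvScan.induct with
  | case1 => simp [pvPieces.eq_1]
  | case2 r ih => simp [pvPieces.eq_2]
  | case3 c2 r hc2 ih =>
    simp only [pvPieces.eq_2, if_true, if_neg hc2, ne_eq,
      List.modifyHead_eq_nil_iff]
    exact ih
  | case4 => simp [pvPieces.eq_3]
  | case5 c rest hc ih =>
    cases rest with
    | nil => simp [pvPieces.eq_3, pvPieces.eq_1, hc]
    | cons c2 r =>
      simp only [pvPieces.eq_2, if_neg hc, ne_eq, List.modifyHead_eq_nil_iff]
      exact ih

theorem pvPieces_cons_exists (l : List Char) : ∃ p ps, pvPieces l = p :: ps := by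
  cases hh : pvPieces l with
  | nil => exact absurd hh (pvPieces_ne_nil l)
  | cons p ps => exact ⟨p, ps, rfl⟩

theorem replace_go_bs (fuel : Nat) (l acc : List Char) (h : l.length ≤ fuel) :
    PySem.Chars.replace.go ['\\'] [] fuel l acc
      = acc.reverse ++ l.filter (fun c => c != '\\') := by
  induction fuel generalizing l acc with
  | zero =>
    have : l = [] := by cases l <;> simp_all
    subst this
    rw [PySem.Chars.replace.go.eq_1]; simp
  | succ f ih =>
    cases l with
    | nil =>
      rw [PySem.Chars.replace.go.eq_2 _ _ _ _ (fun hh => Nat.succ_ne_zero f hh)]; simp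
    | cons c t =>
      simp only [List.length_cons, Nat.succ_le_succ_iff] at h
      rw [PySem.Chars.replace.go.eq_3]
      by_cases hc : c = '\\'
      · subst hc
        have hp : List.isPrefixOf ['\\'] ('\\' :: t) = true := by
          simp [List.isPrefixOf]
        rw [if_pos hp, ih _ _ (by simpa using h)]
        simp
      · have hp : ¬ (List.isPrefixOf ['\\'] (c :: t) = true) := by
          simp [List.isPrefixOf]
          exact fun hh => absurd hh.symm hc
        rw [if_neg hp, ih _ _ h]
        simp [hc]

theorem replace_bs (l : List Char) :
    PySem.Chars.replace l ['\\'] [] = l.filter (fun c => c != '\\') := by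
  have := replace_go_bs l.length l [] (le_refl _)
  simpa [PySem.Chars.replace] using this

theorem splitOn_go_bs (fuel : Nat) (l cur : List Char) (acc : List (List Char))
    (h : l.length < fuel) :
    PySem.Chars.splitOn.go ['\\', '\\'] fuel l cur acc
      = acc.reverse ++ (pvPieces l).modifyHead (cur.reverse ++ ·) := by
  induction fuel generalizing l cur acc with
  | zero => omega
  | succ f ih =>
    cases l with
    | nil =>
      rw [PySem.Chars.splitOn.go.eq_2 _ _ _ _ (fun hh => Nat.succ_ne_zero f hh)]
      simp [pvPieces.eq_1]
    | cons c t =>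
      simp only [List.length_cons, Nat.succ_lt_succ_iff] at h
      rw [PySem.Chars.splitOn.go.eq_3]
      by_cases hp : List.isPrefixOf ['\\', '\\'] (c :: t) = true
      · obtain ⟨hc, r, ht⟩ : c = '\\' ∧ ∃ r, t = '\\' :: r := by
          cases t with
          | nil => simp [List.isPrefixOf] at hp
          | cons c2 r =>
            simp only [List.isPrefixOf, Bool.and_eq_true, beq_iff_eq] at hp
            exact ⟨hp.1.symm, r, by rw [← hp.2.1]⟩
        subst hc; subst ht
        rw [if_pos hp, ih _ _ _ (by simp at h ⊢; omega)]
        obtain ⟨p, ps, hps⟩ := pvPieces_cons_exists r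
        simp [pvPieces.eq_2, hps]
      · rw [if_neg hp, ih t (c :: cur) acc (by omega)]
        have hpieces : pvPieces (c :: t) = (pvPieces t).modifyHead (c :: ·) := by
          by_cases hc : c = '\\'
          · subst hc
            cases t with
            | nil => simp [pvPieces.eq_3, pvPieces.eq_1]
            | cons c2 r =>
              have hc2 : ¬ (c2 = '\\') := by
                intro hh; apply hp; subst hh; simp [List.isPrefixOf]
              simp [pvPieces.eq_2, hc2]
          · cases t with
            | nil => simp [pvPieces.eq_3, hc]
            | cons c2 r => simp [pvPieces.eq_2, hc]
        rw [hpieces]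
        obtain ⟨p, ps, hps⟩ := pvPieces_cons_exists t
        simp [hps]

theorem splitOn_bs (l : List Char) :
    PySem.Chars.splitOn l ['\\', '\\'] = pvPieces l := by
  rw [PySem.Chars.splitOn, splitOn_go_bs (l.length + 1) l [] [] (by omega)]
  obtain ⟨p, ps, hps⟩ := pvPieces_cons_exists l
  simp [hps]

theorem intercalate_cons_head (sep p : List Char) (ps : List (List Char)) (c : Char) :
    List.intercalate sep ((c :: p) :: ps) = c :: List.intercalate sep (p :: ps) := by
  cases ps with
  | nil => simp [List.intercalate]
  | cons q qs => simp [List.intercalate, List.intersperse]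

theorem intercalate_cons_cons' (sep a b : List Char) (l : List (List Char)) :
    List.intercalate sep (a :: b :: l) = a ++ sep ++ List.intercalate sep (b :: l) := by
  simp [List.intercalate, List.intersperse]

theorem join_pieces_scan (l : List Char) :
    PySem.Chars.join ['\\'] ((pvPieces l).map (fun q => q.filter (fun c => c != '\\')))
      = pvScan l := by
  induction l using pvScan.induct with
  | case1 => simp [pvPieces.eq_1, pvScan.eq_1, PySem.Chars.join, List.intercalate]
  | case2 r ih =>
    obtain ⟨p, ps, hps⟩ := pvPieces_cons_exists r
    rw [hps] at ih
    simp only [pvPieces.eq_2, pvScan.eq_2, if_true, hps,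
      List.map_cons, PySem.Chars.join] at ih ⊢
    rw [intercalate_cons_cons']
    simp [ih]
  | case3 c2 r hc2 ih =>
    obtain ⟨p, ps, hps⟩ := pvPieces_cons_exists (c2 :: r)
    rw [hps] at ih
    simp only [pvPieces.eq_2, pvScan.eq_2, if_true, if_neg hc2, hps,
      List.modifyHead_cons, List.map_cons, PySem.Chars.join] at ih ⊢
    rw [show List.filter (fun c => c != '\\') ('\\' :: p)
          = List.filter (fun c => c != '\\') p from by simp]
    exact ih
  | case4 =>
    simp [pvPieces.eq_3, pvScan.eq_3, PySem.Chars.join, List.intercalate]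
  | case5 c rest hc ih =>
    obtain ⟨p, ps, hps⟩ := pvPieces_cons_exists rest
    have hpc : pvPieces (c :: rest) = (pvPieces rest).modifyHead (c :: ·) := by
      cases rest with
      | nil => simp [pvPieces.eq_3, pvPieces.eq_1, hc]
      | cons c2 r => simp [pvPieces.eq_2, hc]
    have hsc : pvScan (c :: rest) = c :: pvScan rest := by
      cases rest with
      | nil => simp [pvScan.eq_3, pvScan.eq_1, hc]
      | cons c2 r => simp [pvScan.eq_2, hc]
    rw [hpc, hsc, hps]
    rw [hps] at ih
    simp only [List.modifyHead_cons, List.map_cons, PySem.Chars.join] at ih ⊢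
    rw [show List.filter (fun c => c != '\\') (c :: p)
          = c :: List.filter (fun c => c != '\\') p from by simp [hc]]
    rw [intercalate_cons_head, ih]

-- pvScan is the identity when there is no backslash at all
theorem pvScan_no_bs (l : List Char) (h : '\\' ∉ l) : pvScan l = l := by
  induction l with
  | nil => rfl
  | cons c rest ih =>
    have hc : ¬ (c = '\\') := fun hh => h (hh ▸ List.mem_cons_self)
    have hrec := ih (fun hm => h (List.mem_cons_of_mem _ hm))
    cases rest with
    | nil => simp [pvScan.eq_3, pvScan.eq_1, hc]
    | cons c2 r => simp [pvScan.eq_2, hc, hrec]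

-- pvScan is filter when there are no two adjacent backslashes
theorem pvScan_no_double (l : List Char) (h : ¬ (['\\', '\\'] <:+: l)) :
    pvScan l = l.filter (fun c => c != '\\') := by
  induction l using pvScan.induct with
  | case1 => rfl
  | case2 r ih =>
    exact absurd ⟨[], r, by simp⟩ h
  | case3 c2 r hc2 ih =>
    rw [pvScan.eq_2]
    simp only [if_true, if_neg hc2]
    rw [ih (fun hinf => h (List.infix_cons hinf))]
    simp
  | case4 => simp [pvScan.eq_3]
  | case5 c rest hc ih =>
    have hrec := ih (fun hinf => h (List.infix_cons hinf))
    cases rest with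
    | nil => simp [pvScan.eq_3, pvScan.eq_1, hc]
    | cons c2 r =>
      rw [pvScan.eq_2, if_neg hc, hrec]
      simp [hc]

-- the third-branch cascade of A equals B's scan, for any inner string
theorem branches_eq_scan (tmp : String) :
    (if !PySem.Str.isIn "\\" tmp then tmp
     else if !PySem.Str.isIn "\\\\" tmp then PySem.Str.replace tmp "\\" ""
     else PySem.Str.join "\\"
       (((PySem.Str.split? tmp "\\\\").getD []).map (fun q => PySem.Str.replace q "\\" "")))
      = String.ofList (pvScan tmp.toList) := by
  by_cases h1 : PySem.Chars.isIn ['\\'] tmp.toList = true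
  · rw [if_neg (by simp [PySem.Str.isIn, h1, show ("\\" : String).toList = ['\\'] from by decide])]
    by_cases h2 : PySem.Chars.isIn ['\\', '\\'] tmp.toList = true
    · rw [if_neg (by simp [PySem.Str.isIn, h2, show ("\\\\" : String).toList = ['\\', '\\'] from by decide])]
      apply String.toList_inj.mp
      rw [PySem.Str.toList_join, String.toList_ofList]
      have hsplit : PySem.Str.split? tmp "\\\\"
          = some ((pvPieces tmp.toList).map String.ofList) := by
        rw [PySem.Str.split?]
        rw [show ("\\\\" : String).toList = ['\\', '\\'] from by decide]
        simp [PySem.Chars.split?, splitOn_bs]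
      rw [hsplit]
      simp only [Option.getD_some, List.map_map]
      rw [show ((pvPieces tmp.toList).map
            (String.toList ∘ (fun q => PySem.Str.replace q "\\" "") ∘ String.ofList))
            = (pvPieces tmp.toList).map (fun q => q.filter (fun c => c != '\\')) from by
        apply List.map_congr_left
        intro q _
        simp only [Function.comp_apply, PySem.Str.toList_replace, String.toList_ofList]
        rw [show ("\\" : String).toList = ['\\'] from by decide,
            show ("" : String).toList = [] from rfl]
        exact replace_bs q]
      simp only [String.toList_ofList]
      exact join_pieces_scan tmp.toList
    · rw [if_pos (by simp [PySem.Str.isIn, show ("\\\\" : String).toList = ['\\', '\\'] from by decide, eq_false_of_ne_true h2])]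
      apply String.toList_inj.mp
      rw [PySem.Str.toList_replace]
      simp only [String.toList_ofList, show ("\\" : String).toList = ['\\'] from by decide,
        show ("" : String).toList = [] from rfl]
      rw [replace_bs]
      have hnd : ¬ (['\\', '\\'] <:+: tmp.toList) :=
        (PySem.Chars.isIn_eq_false_iff _ _).mp (eq_false_of_ne_true h2)
      rw [pvScan_no_double tmp.toList hnd]
  · rw [if_pos (by simp [PySem.Str.isIn, show ("\\" : String).toList = ['\\'] from by decide, eq_false_of_ne_true h1])]
    have hmem : '\\' ∉ tmp.toList := by
      intro hm
      obtain ⟨s, t, hst⟩ := List.append_of_mem hm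
      have hinf : (['\\'] : List Char) <:+: tmp.toList := ⟨s, t, by rw [hst]; simp⟩
      exact (PySem.Chars.isIn_eq_false_iff _ _).mp (eq_false_of_ne_true h1) hinf
    rw [pvScan_no_bs tmp.toList hmem, String.ofList_toList]

-- ===== VERDICT (by name: the statement is the Claim_ definition above) =====
theorem unquote_string_spec : Claim_equal_unquote_string := by
  intro quoted _
  show unquote_string quoted = unquote_string_alt quoted
  rw [unquote_string, unquote_string_alt]
  by_cases h1 : PySem.Str.len quoted < 2
  · rw [if_pos h1, if_pos h1]
  · rw [if_neg h1, if_neg h1]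
    by_cases h2 : (PySem.Str.pyGet? quoted 0 != some '"' || PySem.Str.pyGet? quoted (-1) != some '"') = true
    · rw [if_pos h2, if_pos h2]
    · rw [if_neg h2, if_neg h2]
      exact branches_eq_scan _
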